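-- pv_equiv track=rewrite | github.com/t3bol90/I2AI-Lab-02 | 18127231/SOURCE/entail.py | dnf_to_cnf
-- ===== SOURCE A (Python) =====
-- def comparator_form(literal):
--     """
--     ['A'] -> ['A']
--     ['-A'] -> ['A']
--     """
--     if literal[0] == "-":
--         return literal[1:]
--     else:
--         return literal
--
-- def trim(clause):
--     """
--     Bubble sort for clause - by alphabet
--     :param clause:
--     :return: sorted clause
--     """
--     i = 0
--     while(i < len(clause)-1):
--         j = i+1
--         while(j < len(clause)):
--             if clause[i] == clause[j]:
--                 del clause[j]
--                 j -= 1
--                 i -= 1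
--             j += 1
--         i += 1
--
--     for i in range(len(clause)-1):
--         for j in range(i+1, len(clause)):
--             if (comparator_form(clause[i]) > comparator_form(clause[j])):
--                 clause[i], clause[j] = clause[j], clause[i]
--     return clause
--
-- def is_eval_cnf_form(clause, exist):
--     for c in exist:
--         if set(c).issubset(set(clause)):
--             return False
--     return True
--
-- def dnf_to_cnf(alpha_list):
--     alpha_cnf = []
--     alpha_list.sort(key=lambda x: len(set(x)))
--     for i in alpha_list:
--         clause = trim(sorted(set(i)))
--         if clause not in alpha_cnf and is_eval_cnf_form(clause, alpha_cnf):
--             alpha_cnf.append(clause)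
--     return alpha_cnf
-- ===== SOURCE B (Python) =====
-- def dnf_to_cnf(alpha_list):
--     # Same observable in-place sort as A; the clause selection is done in two
--     # separate phases instead of A's incremental keep-list scan, and the
--     # per-clause normalization is a single key-sort of the literal set.
--     alpha_list.sort(key=lambda x: len(set(x)))
--     # phase 1: normalized clauses, deduplicated in first-appearance order
--     norm = []
--     for c in alpha_list:
--         nc = sorted(set(c), key=lambda x: (x[1:] if x[:1] == "-" else x, x))
--         if nc not in norm:
--             norm.append(nc)
--     # phase 2: keep exactly the clauses whose literal set is minimal
--     return [c for c in norm if not any(set(d) < set(c) for d in norm)]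
-- ===== Notes on version B (the rewrite author's own statement) =====
-- stated objective: alternative
-- what changed: A's single incremental loop (append a normalized clause only if no already-kept clause subsumes it) is replaced by two phases — build the deduplicated list of all normalized clauses, then keep exactly the clauses whose literal set is subset-minimal — and A's per-clause normalization (dedup double-while plus an index-swapping exchange sort by the dash-stripped key) is replaced by one stable sort of the literal set under the tuple key (stripped literal, literal); the in-place sort of alpha_list is kept.
import Mathlib
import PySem

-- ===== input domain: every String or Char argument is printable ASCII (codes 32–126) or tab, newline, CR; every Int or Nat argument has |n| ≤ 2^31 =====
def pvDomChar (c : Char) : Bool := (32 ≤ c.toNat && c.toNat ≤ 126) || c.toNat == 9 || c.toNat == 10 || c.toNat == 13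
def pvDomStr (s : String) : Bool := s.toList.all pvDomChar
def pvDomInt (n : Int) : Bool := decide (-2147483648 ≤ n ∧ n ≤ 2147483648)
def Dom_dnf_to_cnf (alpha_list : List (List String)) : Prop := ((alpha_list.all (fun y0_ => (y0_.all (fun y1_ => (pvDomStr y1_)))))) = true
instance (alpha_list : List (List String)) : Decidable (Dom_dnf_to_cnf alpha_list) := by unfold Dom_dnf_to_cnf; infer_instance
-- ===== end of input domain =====

-- B replaces A's incremental keep-list subsumption scan by two phases (dedup all normalized
-- clauses, then keep the subset-minimal ones) and replaces A's per-clause dedup-and-exchange-sort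
-- normalization by one stable key-sort of the literal set (objective: alternative).  Both Pythons
-- sort `alpha_list` in place the same way; the equivalence proved here is about the return value.

-- ===== PORT A =====
def comparator_form (literal : String) : String :=
  -- if literal[0] == "-": literal[1:] else literal  (Python raises IndexError on ""; excluded by Pre_)
  match literal.toList with
  | [] => literal
  | c :: rest => if c = '-' then String.ofList rest else literal

-- first while-loop pair of `trim` (duplicate removal with the i/j decrements).
-- `fuel` bounds the loop: on every state Python reaches, the inner while makes at most
-- 2*len(clause)+2 steps and the outer one at most len(clause)+1 (length − i decreases each round).
def trimInner (fuel : Nat) (c : List String) (i j : Int) : List String × Int :=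
  match fuel with
  | 0 => (c, i)   -- never reached with the fuel trimOuter supplies
  | f + 1 =>
    if j < (c.length : Int) then
      match PySem.List.pyGet? c i, PySem.List.pyGet? c j with
      | some a, some b =>
        if a = b then trimInner f (c.eraseIdx j.toNat) (i - 1) j
        else trimInner f c i (j + 1)
      | _, _ => (c, i)   -- Python raises IndexError here (never reached on admitted inputs)
    else (c, i)

def trimOuter (fuel : Nat) (c : List String) (i : Int) : List String :=
  match fuel with
  | 0 => c   -- never reached: length − i decreases by 1 each round
  | f + 1 =>
    if i < (c.length : Int) - 1 then
      let p := trimInner (2 * c.length + 2) c i (i + 1)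
      trimOuter f p.1 (p.2 + 1)
    else c

-- second phase of `trim`: the index double loop
--   for i in range(len-1): for j in range(i+1, len): if cf(c[i]) > cf(c[j]): swap c[i],c[j]
-- ported as the same loop over the same state: the inner j-loop threads the current holder of
-- slot i through the tail (a swap emits the old holder at slot j and carries c[j] on, exactly the
-- comparisons Python makes, in the same order); the outer i-loop recurses on the produced suffix.
def selPass (v : String) (s : List String) : String × List String :=
  match s with
  | [] => (v, [])
  | y :: t =>
    if comparator_form v > comparator_form y then
      let p := selPass y t; (p.1, v :: p.2)
    else
      let p := selPass v t; (p.1, y :: p.2)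

theorem selPass_len (s : List String) (v : String) : (selPass v s).2.length = s.length := by
  induction s generalizing v with
  | nil => rfl
  | cons y t ih =>
    simp only [selPass]
    split
    · simpa using ih y
    · simpa using ih v

def selSort (c : List String) : List String :=
  match c with
  | [] => []
  | v :: t => (selPass v t).1 :: selSort (selPass v t).2
termination_by c.length
decreasing_by simp [selPass_len]

def trim (clause : List String) : List String := selSort (trimOuter (clause.length + 1) clause 0)

def is_eval_cnf_form (clause : List String) (exist : List (List String)) : Bool :=
  match exist with
  | [] => true
  | c :: rest =>
    if PySem.Set.issubset (PySem.Set.ofList c) (PySem.Set.ofList clause) then false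
    else is_eval_cnf_form clause rest

def dnf_to_cnf (alpha_list : List (List String)) : List (List String) :=
  let sortedL := PySem.List.sorted alpha_list (fun x => PySem.Set.len (PySem.Set.ofList x)) false
  sortedL.foldl
    (fun alpha_cnf i =>
      let clause := trim (PySem.List.sorted (PySem.Set.ofList i) (fun x => x) false)
      if clause ∉ alpha_cnf ∧ is_eval_cnf_form clause alpha_cnf then alpha_cnf ++ [clause]
      else alpha_cnf)
    []

-- ===== PORT B =====
-- the key lambda of Source B: x[1:] if x[:1] == "-" else x  (second tuple component is x itself)
def key1 (x : String) : String :=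
  if PySem.Str.slice x none (some 1) = "-" then PySem.Str.slice x (some 1) none else x

def dnf_to_cnf_alt (alpha_list : List (List String)) : List (List String) :=
  let sortedL := PySem.List.sorted alpha_list (fun x => PySem.Set.len (PySem.Set.ofList x)) false
  -- phase 1: normalized clauses (stable sort of the literal set by the tuple key), deduplicated
  let norm := sortedL.foldl
    (fun norm c =>
      let nc := PySem.List.sorted2 (PySem.Set.ofList c) key1 (fun x => x) false
      if nc ∈ norm then norm else norm ++ [nc])
    []
  -- phase 2: keep exactly the clauses whose set is minimal (set(d) < set(c) for no d)
  norm.filter (fun c => ! norm.any (fun d =>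
    PySem.Set.issubset (PySem.Set.ofList d) (PySem.Set.ofList c)
      && ! PySem.Set.issubset (PySem.Set.ofList c) (PySem.Set.ofList d)))

-- ===== PRECONDITION & SPEC =====
-- Pre_ excludes exactly the inputs where Python A raises IndexError: a clause containing ""
-- together with a different literal makes `comparator_form("")` evaluate `""[0]`.
def Pre_dnf_to_cnf (alpha_list : List (List String)) : Prop :=
  ∀ c ∈ alpha_list, "" ∈ c → ∀ x ∈ c, x = ""
instance (alpha_list : List (List String)) : Decidable (Pre_dnf_to_cnf alpha_list) := by
  unfold Pre_dnf_to_cnf; infer_instance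

def pvWitness_dnf_to_cnf : List (List String) := [["q"], ["-p", "q"], ["q", "-p", "q"]]

def Spec_dnf_to_cnf (alpha_list : List (List String)) (out : List (List String)) : Prop := out = dnf_to_cnf_alt alpha_list
instance (alpha_list : List (List String)) (out : List (List String)) : Decidable (Spec_dnf_to_cnf alpha_list out) := by unfold Spec_dnf_to_cnf; infer_instance

-- ===== CLAIM (what is proved, stated in full; the proofs are below) =====
def Claim_equal_dnf_to_cnf : Prop := ∀ (alpha_list : List (List String)), Dom_dnf_to_cnf alpha_list → Pre_dnf_to_cnf alpha_list → Spec_dnf_to_cnf alpha_list (dnf_to_cnf alpha_list)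


-- ===== LEMMAS AND PROOFS =====

-- ---- string / comparator_form basics ----
theorem str_eq_iff (s t : String) : s = t ↔ s.toList = t.toList :=
  ⟨fun h => h ▸ rfl, String.toList_inj.mp⟩

theorem cf_nil (x : String) (hx : x.toList = []) : comparator_form x = x := by
  unfold comparator_form; rw [hx]

theorem cf_dash (r : List Char) (x : String) (hx : x.toList = '-' :: r) :
    comparator_form x = String.ofList r := by
  unfold comparator_form; rw [hx]; simp

theorem cf_cons (c : Char) (r : List Char) (x : String) (hx : x.toList = c :: r)
    (hc : c ≠ '-') : comparator_form x = x := by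
  unfold comparator_form; rw [hx]; simp [hc]

theorem cf_fiber (x : String) :
    x.toList = (comparator_form x).toList ∨ x.toList = '-' :: (comparator_form x).toList := by
  rcases hx : x.toList with _ | ⟨c, r⟩
  · left; rw [cf_nil x hx]; exact hx.symm
  · by_cases hc : c = '-'
    · subst hc
      right; rw [cf_dash r x hx]; simp
    · left; rw [cf_cons c r x hx hc]; exact hx.symm

-- a string with a fixed comparator_form (cf x = x as lists) cannot start with '-'
theorem cf_fix_no_dash (x : String) (hx : x.toList = (comparator_form x).toList)
    (r : List Char) (h : x.toList = '-' :: r) : False := by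
  have h2 : (comparator_form x).toList = r := by rw [cf_dash r x h]; simp
  rw [h2] at hx
  rw [h] at hx
  exact List.cons_ne_self '-' r hx

theorem nil_le_list (l : List Char) : ([] : List Char) ≤ l := by
  cases l with
  | nil => exact le_refl _
  | cons a t => exact le_of_lt (List.nil_lt_cons a t)

-- the key combinatorial fact about comparator_form and the lexicographic string order:
-- if x and y tie under comparator_form and x < y, anything above y has key ≥ the tied key
theorem cf_triple (x y w : String) (hxy : comparator_form x = comparator_form y)
    (h1 : x < y) (h2 : y < w) : comparator_form x ≤ comparator_form w := by
  have hl1 := String.lt_iff_toList_lt.mp h1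
  have hl2 := String.lt_iff_toList_lt.mp h2
  rcases cf_fiber x with hx | hx <;> rcases cf_fiber y with hy | hy <;> rw [← hxy] at hy
  · exfalso
    exact absurd (str_eq_iff x y |>.mpr (hx.trans hy.symm)) (ne_of_lt h1)
  · -- x = τ, y = '-'::τ
    rw [String.le_iff_toList_le]
    rcases cf_fiber w with hw | hw
    · rw [← hw]
      rcases hτ : (comparator_form x).toList with _ | ⟨c, rest⟩
      · exact nil_le_list _
      · rcases hwl : w.toList with _ | ⟨d, W⟩
        · exfalso; rw [hy, hwl] at hl2; exact (List.not_lt_nil _) hl2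
        · have hd : d ≠ '-' := by
            intro hd; subst hd; exact cf_fix_no_dash w hw W hwl
          rw [hy, hwl] at hl2
          rcases List.cons_lt_cons_iff.mp hl2 with hlt | ⟨heq, _⟩
          · have hcne : c ≠ '-' := by
              intro hc; subst hc
              exact cf_fix_no_dash x hx rest (hx.trans hτ)
            rw [hx, hy, hτ] at hl1
            rcases List.cons_lt_cons_iff.mp hl1 with hlt2 | ⟨heq2, _⟩
            · exact le_of_lt (List.cons_lt_cons_iff.mpr (Or.inl (lt_trans hlt2 hlt)))
            · exact absurd heq2 hcne
          · exact absurd heq.symm hd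
    · rw [hy, hw] at hl2
      rcases List.cons_lt_cons_iff.mp hl2 with hlt | ⟨_, hlt⟩
      · exact absurd hlt (lt_irrefl '-')
      · exact le_of_lt hlt
  · -- x = '-'::τ, y = τ
    rw [String.le_iff_toList_le]
    rcases cf_fiber w with hw | hw
    · rw [← hw, ← hy]; exact le_of_lt hl2
    · exfalso
      rcases hτ : (comparator_form x).toList with _ | ⟨c, rest⟩
      · rw [hx, hy, hτ] at hl1; exact (List.not_lt_nil _) hl1
      · have hy' : y.toList = (comparator_form y).toList := by rw [← hxy]; exact hy
        have hcne : c ≠ '-' := by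
          intro hc; subst hc
          exact cf_fix_no_dash y hy' rest (hy.trans hτ)
        rw [hx, hy, hτ] at hl1
        rcases List.cons_lt_cons_iff.mp hl1 with hlt | ⟨heq, _⟩
        · rw [hy, hτ, hw] at hl2
          rcases List.cons_lt_cons_iff.mp hl2 with hlt2 | ⟨heq2, _⟩
          · exact absurd (lt_trans hlt hlt2) (lt_irrefl '-')
          · exact absurd heq2 hcne
        · exact absurd heq.symm hcne
  · exfalso
    exact absurd (str_eq_iff x y |>.mpr (hx.trans hy.symm)) (ne_of_lt h1)

-- at most two strings share a comparator_form value
theorem cf_pigeon (a b c : String) (h1 : comparator_form a = comparator_form b)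
    (h2 : comparator_form a = comparator_form c) (hab : a ≠ b) (hac : a ≠ c) : b = c := by
  rcases cf_fiber a with ha | ha <;> rcases cf_fiber b with hb | hb <;>
    rcases cf_fiber c with hc | hc <;>
    rw [← h1] at hb <;> rw [← h2] at hc
  all_goals first
    | (exact absurd (str_eq_iff a b |>.mpr (ha.trans hb.symm)) hab)
    | (exact absurd (str_eq_iff a c |>.mpr (ha.trans hc.symm)) hac)
    | (exact str_eq_iff b c |>.mpr (hb.trans hc.symm))

-- ---- the strict order used by both normalizations ----
def kltB (a b : String) : Bool :=
  decide (comparator_form a < comparator_form b) ||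
    (decide (comparator_form a = comparator_form b) && decide (a < b))

theorem kltB_iff (a b : String) : kltB a b = true ↔
    (comparator_form a < comparator_form b ∨ (comparator_form a = comparator_form b ∧ a < b)) := by
  simp [kltB]

theorem kltB_asymm {a b : String} (h : kltB a b = true) : ¬ kltB b a = true := by
  rw [kltB_iff] at h ⊢
  rcases h with h | ⟨he, hl⟩
  · rintro (h2 | ⟨he2, _⟩)
    · exact absurd (lt_trans h h2) (lt_irrefl _)
    · exact absurd he2 (ne_of_gt h)
  · rintro (h2 | ⟨_, hl2⟩)
    · exact absurd h2 (he ▸ lt_irrefl _)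
    · exact absurd (lt_trans hl hl2) (lt_irrefl _)

theorem kltB_trans {a b c : String} (h1 : kltB a b = true) (h2 : kltB b c = true) :
    kltB a c = true := by
  rw [kltB_iff] at h1 h2 ⊢
  rcases h1 with h1 | ⟨he1, hl1⟩ <;> rcases h2 with h2 | ⟨he2, hl2⟩
  · exact Or.inl (lt_trans h1 h2)
  · exact Or.inl (he2 ▸ h1)
  · exact Or.inl (he1 ▸ h2)
  · exact Or.inr ⟨he1.trans he2, lt_trans hl1 hl2⟩

theorem kltB_total {a b : String} (h : a ≠ b) : kltB a b = true ∨ kltB b a = true := by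
  rw [kltB_iff, kltB_iff]
  rcases lt_trichotomy (comparator_form a) (comparator_form b) with hc | hc | hc
  · exact Or.inl (Or.inl hc)
  · rcases lt_trichotomy a b with hs | hs | hs
    · exact Or.inl (Or.inr ⟨hc, hs⟩)
    · exact absurd hs h
    · exact Or.inr (Or.inr ⟨hc.symm, hs⟩)
  · exact Or.inr (Or.inl hc)

theorem kltB_cf_le {a b : String} (h : kltB a b = true) :
    comparator_form a ≤ comparator_form b := by
  rcases (kltB_iff a b).mp h with h | ⟨he, _⟩
  · exact le_of_lt h
  · exact le_of_eq he

-- ---- the loop invariant of A's exchange sort ----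
def INV2 (l : List String) : Prop :=
  ∀ x y, [x, y].Sublist l → comparator_form x = comparator_form y →
    x < y ∧ ∀ z, [x, y, z].Sublist l → comparator_form x ≤ comparator_form z

theorem INV2_mono {l l' : List String} (hs : l'.Sublist l) (h : INV2 l) : INV2 l' :=
  fun x y hxy hcf =>
    ⟨(h x y (hxy.trans hs) hcf).1, fun z hz => (h x y (hxy.trans hs) hcf).2 z (hz.trans hs)⟩

theorem INV2_of_pairwise {l : List String} (h : l.Pairwise (· < ·)) : INV2 l := by
  intro x y hxy hcf
  have hp : ([x, y] : List String).Pairwise (· < ·) := List.Pairwise.sublist hxy h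
  have hxy' : x < y := by simpa using hp
  refine ⟨hxy', fun z hz => ?_⟩
  have hp3 : ([x, y, z] : List String).Pairwise (· < ·) := List.Pairwise.sublist hz h
  have hyz : y < z := by
    rw [List.pairwise_cons] at hp3
    have h4 := hp3.2
    rw [List.pairwise_cons] at h4
    exact h4.1 z (by simp)
  exact cf_triple x y z hcf hxy' hyz

-- ---- reduction lemmas for selPass ----
theorem selPass_cons_pos (v y : String) (t : List String)
    (h : comparator_form v > comparator_form y) :
    selPass v (y :: t) = ((selPass y t).1, v :: (selPass y t).2) := by
  simp only [selPass, if_pos h]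

theorem selPass_cons_neg (v y : String) (t : List String)
    (h : ¬ comparator_form v > comparator_form y) :
    selPass v (y :: t) = ((selPass v t).1, y :: (selPass v t).2) := by
  simp only [selPass, if_neg h]

-- ---- the inner pass of A's exchange sort: selects the least element w.r.t. kltB,
-- preserves the invariant, and every reordered pair is accounted for ----
theorem selPass_spec : ∀ (s : List String) (v : String),
    (v :: s).Nodup → INV2 (v :: s) →
    ((selPass v s).1 :: (selPass v s).2).Perm (v :: s)
    ∧ (∀ x ∈ (selPass v s).2, kltB (selPass v s).1 x = true)
    ∧ INV2 (selPass v s).2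
    ∧ (∀ p q, [p, q].Sublist (selPass v s).2 →
        [p, q].Sublist (v :: s) ∨ comparator_form p ≤ comparator_form q ∨
          ∃ u, [p, u].Sublist (v :: s) ∧ comparator_form u < comparator_form q) := by
  intro s
  induction s with
  | nil =>
    intro v _ _
    refine ⟨by simp [selPass], by simp [selPass], ?_, ?_⟩
    · intro x z hxz _
      simp [selPass] at hxz
    · intro p q hpq
      simp [selPass] at hpq
  | cons y t ih =>
    intro v hnd hinv
    have hvny : v ∉ y :: t := (List.nodup_cons.mp hnd).1
    by_cases hgt : comparator_form v > comparator_form y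
    · -- swap branch: candidate becomes y, v is emitted at this slot
      obtain ⟨ihP, ihM, ihI, ihO⟩ :=
        ih y (hnd.of_cons) (INV2_mono (List.sublist_cons_self v (y :: t)) hinv)
      have hmemr : ∀ a, a ∈ (selPass y t).2 → a ∈ y :: t :=
        fun a ha => ihP.mem_iff.mp (List.mem_cons_of_mem _ ha)
      simp only [selPass_cons_pos v y t hgt]
      refine ⟨?_, ?_, ?_, ?_⟩
      · exact (List.Perm.swap v (selPass y t).1 (selPass y t).2).trans (ihP.cons v)
      · intro x hx
        rcases List.mem_cons.mp hx with hxv | hx'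
        · rw [hxv]
          have hmy : comparator_form (selPass y t).1 ≤ comparator_form y := by
            have hy2 : y ∈ (selPass y t).1 :: (selPass y t).2 := ihP.mem_iff.mpr (by simp)
            rcases List.mem_cons.mp hy2 with h | h
            · exact (congrArg comparator_form h).ge
            · exact kltB_cf_le (ihM y h)
          exact (kltB_iff _ _).mpr (Or.inl (lt_of_le_of_lt hmy hgt))
        · exact ihM x hx'
      · intro x z hxz hcf
        cases hxz with
        | cons a h =>
          refine ⟨(ihI x z h hcf).1, ?_⟩
          intro w hw
          cases hw with
          | cons a2 hw' => exact (ihI x z h hcf).2 w hw'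
          | cons₂ _a hw' =>
            -- the head v would have to equal x, but x lies in the pass output ⊆ y :: t
            exfalso
            have : v ∈ y :: t := hmemr v (by
              have := h.subset (by simp : v ∈ [v, z])
              exact this)
            exact hvny this
        | cons₂ _a h =>
          -- x = v, z in the output of the pass
          have hzr : z ∈ (selPass y t).2 := List.singleton_sublist.mp h
          have hzyt : z ∈ y :: t := hmemr z hzr
          have hvz : [v, z].Sublist (v :: y :: t) :=
            List.Sublist.cons₂ v (List.singleton_sublist.mpr hzyt)
          refine ⟨(hinv v z hvz hcf).1, ?_⟩
          intro w hw
          have hzw : [z, w].Sublist (selPass y t).2 := by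
            cases hw with
            | cons a hw' => exact absurd (hmemr v (hw'.subset (by simp))) hvny
            | cons₂ _a hw' => exact hw'
          rcases ihO z w hzw with hord | hle | ⟨u, hu, hult⟩
          · exact (hinv v z hvz hcf).2 w (List.Sublist.cons₂ v hord)
          · rw [hcf]; exact hle
          · have := (hinv v z hvz hcf).2 u (List.Sublist.cons₂ v hu)
            exact le_of_lt (lt_of_le_of_lt this hult)
      · intro p q hpq
        cases hpq with
        | cons a h =>
          rcases ihO p q h with hord | hle | ⟨u, hu, hult⟩
          · exact Or.inl (hord.cons v)
          · exact Or.inr (Or.inl hle)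
          · exact Or.inr (Or.inr ⟨u, hu.cons v, hult⟩)
        | cons₂ _a h =>
          -- p = v, q in pass output ⊆ y :: t : order preserved
          have hq : q ∈ y :: t := hmemr q (List.singleton_sublist.mp h)
          exact Or.inl (List.Sublist.cons₂ v (List.singleton_sublist.mpr hq))
    · -- no-swap branch: candidate stays v, y is emitted at this slot
      have hvt : (v :: t).Nodup := by
        rcases List.nodup_cons.mp hnd with ⟨h1, h2⟩
        rcases List.nodup_cons.mp h2 with ⟨_, h4⟩
        exact List.nodup_cons.mpr ⟨fun hvt => h1 (List.mem_cons_of_mem y hvt), h4⟩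
      have hvtsub : (v :: t).Sublist (v :: y :: t) :=
        List.Sublist.cons₂ v (List.sublist_cons_self y t)
      obtain ⟨ihP, ihM, ihI, ihO⟩ := ih v hvt (INV2_mono hvtsub hinv)
      have hmemr : ∀ a, a ∈ (selPass v t).2 → a ∈ v :: t :=
        fun a ha => ihP.mem_iff.mp (List.mem_cons_of_mem _ ha)
      have hynvt : y ∉ v :: t := by
        intro hy
        rcases List.mem_cons.mp hy with h | h
        · exact hvny (h ▸ List.mem_cons_self)
        · rcases List.nodup_cons.mp hnd with ⟨_, h2⟩
          exact (List.nodup_cons.mp h2).1 h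
      have hvy_le : comparator_form v ≤ comparator_form y := le_of_not_gt hgt
      -- if v survives into the pass output, the selected element precedes it strictly in key
      have hvsurv : v ∈ (selPass v t).2 → comparator_form (selPass v t).1 < comparator_form v := by
        intro hvr
        have hk := ihM v hvr
        rcases (kltB_iff _ _).mp hk with h | ⟨he, hl⟩
        · exact h
        · exfalso
          have hmv : (selPass v t).1 ∈ v :: t := ihP.mem_iff.mp (by simp)
          rcases List.mem_cons.mp hmv with h1 | h1
          · -- selected = v and v also in output contradicts nodup
            have : ((selPass v t).1 :: (selPass v t).2).Nodup := ihP.nodup_iff.mpr hvt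
            rw [h1] at this
            exact (List.nodup_cons.mp this).1 hvr
          · -- selected ∈ t ties v with selected after it: INV2 forces v < selected
            have hvm : [v, (selPass v t).1].Sublist (v :: y :: t) := by
              refine List.Sublist.cons₂ v ?_
              exact (List.singleton_sublist.mpr h1).cons y
            have := (hinv v (selPass v t).1 hvm he.symm).1
            exact absurd hl (asymm this)
      simp only [selPass_cons_neg v y t hgt]
      refine ⟨?_, ?_, ?_, ?_⟩
      · -- (m :: y :: r).Perm (v :: y :: t)
        refine ((List.Perm.swap y (selPass v t).1 (selPass v t).2).trans ?_).trans
          (List.Perm.swap v y t)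
        exact ihP.cons y
      · intro x hx
        rcases List.mem_cons.mp hx with hxy | hx'
        · rw [hxy]
          -- kltB m y
          have hmv : comparator_form (selPass v t).1 ≤ comparator_form v := by
            have hv2 : v ∈ (selPass v t).1 :: (selPass v t).2 := ihP.mem_iff.mpr (by simp)
            rcases List.mem_cons.mp hv2 with h | h
            · exact (congrArg comparator_form h).ge
            · exact kltB_cf_le (ihM v h)
          rcases lt_or_eq_of_le (le_trans hmv hvy_le) with hlt | heqc
          · exact (kltB_iff _ _).mpr (Or.inl hlt)
          · -- all three keys equal: the selected element must be v itself
            have hmv_eq : (selPass v t).1 = v := by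
              by_contra hne
              have hmem : (selPass v t).1 ∈ v :: t := ihP.mem_iff.mp (by simp)
              rcases List.mem_cons.mp hmem with h | h
              · exact hne h
              · -- three distinct strings with one key: impossible
                have hces : comparator_form v = comparator_form (selPass v t).1 := by
                  have h1 : comparator_form (selPass v t).1 ≤ comparator_form v := hmv
                  have h2 : comparator_form v ≤ comparator_form y := hvy_le
                  have h3 : comparator_form (selPass v t).1 = comparator_form y := heqc
                  have h4 : comparator_form v ≤ comparator_form (selPass v t).1 := by
                    rw [h3]; exact h2
                  exact le_antisymm h4 h1
                have hcey : comparator_form v = comparator_form y := by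
                  rw [hces, heqc]
                have hvm : v ≠ (selPass v t).1 := fun hh => hne hh.symm
                have hvy : v ≠ y := fun hh => hvny (hh ▸ List.mem_cons_self)
                have : (selPass v t).1 = y := cf_pigeon v (selPass v t).1 y hces hcey hvm hvy
                exact hynvt (List.mem_cons_of_mem v (this ▸ h))
            rw [hmv_eq]
            have hvy2 : [v, y].Sublist (v :: y :: t) :=
              List.Sublist.cons₂ v ((List.singleton_sublist.mpr List.mem_cons_self))
            have hcvy : comparator_form v = comparator_form y := by
              rw [← hmv_eq, heqc]
            exact (kltB_iff _ _).mpr (Or.inr ⟨hcvy, (hinv v y hvy2 hcvy).1⟩)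
        · exact ihM x hx'
      · -- INV2 (y :: r)
        intro x z hxz hcf
        cases hxz with
        | cons a h =>
          refine ⟨(ihI x z h hcf).1, ?_⟩
          intro w hw
          cases hw with
          | cons a2 hw' => exact (ihI x z h hcf).2 w hw'
          | cons₂ _a hw' =>
            exfalso
            exact hynvt (hmemr y (h.subset (by simp)))
        | cons₂ _a h =>
          -- x = y, z in pass output
          have hzr : z ∈ (selPass v t).2 := List.singleton_sublist.mp h
          have hzvt : z ∈ v :: t := hmemr z hzr
          have hznv : z ≠ v := by
            intro rfl_
            -- z = v : keys of v and y tie, yet v is in the output ⇒ selected key < cf v,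
            -- while INV2 on the tie (v, y, selected) forces cf v ≤ selected's key
            have hlt := hvsurv (rfl_ ▸ hzr)
            have hcvy : comparator_form v = comparator_form y := by rw [← rfl_, ← hcf]
            have hmvt : (selPass v t).1 ∈ v :: t := ihP.mem_iff.mp (by simp)
            rcases List.mem_cons.mp hmvt with h1 | h1
            · rw [h1] at hlt; exact absurd hlt (lt_irrefl _)
            · have hvym : [v, y, (selPass v t).1].Sublist (v :: y :: t) := by
                refine List.Sublist.cons₂ v (List.Sublist.cons₂ y ?_)
                exact List.singleton_sublist.mpr h1
              have hvy2 : [v, y].Sublist (v :: y :: t) :=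
                List.Sublist.cons₂ v (List.singleton_sublist.mpr List.mem_cons_self)
              have := (hinv v y hvy2 hcvy).2 (selPass v t).1 hvym
              exact absurd hlt (not_lt_of_ge this)
          have hzt : z ∈ t := by
            rcases List.mem_cons.mp hzvt with h1 | h1
            · exact absurd h1 hznv
            · exact h1
          have hyz_sub : [y, z].Sublist (v :: y :: t) :=
            (List.Sublist.cons₂ y (List.singleton_sublist.mpr hzt)).cons v
          refine ⟨(hinv y z hyz_sub hcf).1, ?_⟩
          intro w hw
          have hzw : [z, w].Sublist (selPass v t).2 := by
            cases hw with
            | cons a hw' => exact absurd (hmemr y (hw'.subset (by simp))) hynvt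
            | cons₂ _a hw' => exact hw'
          rcases ihO z w hzw with hord | hle | ⟨u, hu, hult⟩
          · -- [z,w] <+ v::t and z ≠ v ⇒ [z,w] <+ t
            have hzw_t : [z, w].Sublist t := by
              cases hord with
              | cons a h' => exact h'
              | cons₂ _a h' => exact absurd rfl hznv
            have : [y, z, w].Sublist (v :: y :: t) :=
              (List.Sublist.cons₂ y hzw_t).cons v
            exact (hinv y z hyz_sub hcf).2 w this
          · rw [hcf]; exact hle
          · have hzu_t : [z, u].Sublist t := by
              cases hu with
              | cons a h' => exact h'
              | cons₂ _a h' => exact absurd rfl hznv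
            have h3 : [y, z, u].Sublist (v :: y :: t) :=
              (List.Sublist.cons₂ y hzu_t).cons v
            have := (hinv y z hyz_sub hcf).2 u h3
            exact le_of_lt (lt_of_le_of_lt this hult)
      · intro p q hpq
        cases hpq with
        | cons a h =>
          rcases ihO p q h with hord | hle | ⟨u, hu, hult⟩
          · exact Or.inl (hord.trans hvtsub)
          · exact Or.inr (Or.inl hle)
          · exact Or.inr (Or.inr ⟨u, hu.trans hvtsub, hult⟩)
        | cons₂ _a h =>
          -- p = y, q in pass output
          have hq : q ∈ v :: t := hmemr q (List.singleton_sublist.mp h)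
          rcases List.mem_cons.mp hq with hqv | hqt
          · -- q = v : the selected element witnesses a strictly smaller key after y
            have hvr : v ∈ (selPass v t).2 := by
              have := List.singleton_sublist.mp h
              rwa [hqv] at this
            have hlt := hvsurv hvr
            have hmvt : (selPass v t).1 ∈ v :: t := ihP.mem_iff.mp (by simp)
            rcases List.mem_cons.mp hmvt with h1 | h1
            · rw [h1] at hlt; exact absurd hlt (lt_irrefl _)
            · refine Or.inr (Or.inr ⟨(selPass v t).1, ?_, by rw [hqv]; exact hlt⟩)
              exact (List.Sublist.cons₂ y (List.singleton_sublist.mpr h1)).cons v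
          · exact Or.inl ((List.Sublist.cons₂ y (List.singleton_sublist.mpr hqt)).cons v)

-- ---- the outer loop: selection sort produces a kltB-sorted permutation ----
theorem selSort_spec : ∀ (n : Nat) (c : List String), c.length ≤ n → c.Nodup → INV2 c →
    (selSort c).Perm c ∧ (selSort c).Pairwise (fun a b => kltB a b = true) := by
  intro n
  induction n with
  | zero =>
    intro c hc _ _
    have : c = [] := List.eq_nil_of_length_eq_zero (Nat.le_zero.mp hc)
    subst this
    exact ⟨by simp [selSort], by simp [selSort]⟩
  | succ n ihn =>
    intro c hc hnd hinv
    match c with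
    | [] => exact ⟨by simp [selSort], by simp [selSort]⟩
    | v :: t =>
      obtain ⟨hP, hM, hI, _⟩ := selPass_spec t v hnd hinv
      have hlen : (selPass v t).2.length = t.length := selPass_len t v
      have hnd2 : (selPass v t).2.Nodup := by
        have := hP.nodup_iff.mpr hnd
        exact (List.nodup_cons.mp this).2
      obtain ⟨ihp, ihpw⟩ := ihn (selPass v t).2 (by rw [hlen]; simp at hc; omega) hnd2 hI
      rw [selSort]
      constructor
      · exact (ihp.cons (selPass v t).1).trans hP
      · refine List.pairwise_cons.mpr ⟨?_, ihpw⟩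
        intro b hb
        exact hM b (ihp.mem_iff.mp hb)

-- ---- a strictly kltB-sorted permutation is unique ----
theorem klt_sorted_unique : ∀ (l₁ l₂ : List String), l₁.Perm l₂ →
    l₁.Pairwise (fun a b => kltB a b = true) → l₂.Pairwise (fun a b => kltB a b = true) →
    l₁ = l₂ := by
  intro l₁
  induction l₁ with
  | nil => intro l₂ hp _ _; exact hp.nil_eq
  | cons a t ih =>
    intro l₂ hp h1 h2
    match l₂ with
    | [] => exact absurd hp.symm (by simp)
    | b :: t₂ =>
      have hab : a = b := by
        by_contra hne
        have hamem : a ∈ b :: t₂ := hp.subset (by simp)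
        have hbmem : b ∈ a :: t := hp.symm.subset (by simp)
        rcases List.mem_cons.mp hamem with h | h
        · exact hne h
        · rcases List.mem_cons.mp hbmem with h' | h'
          · exact hne h'.symm
          · have hk1 := (List.pairwise_cons.mp h1).1 b h'
            have hk2 := (List.pairwise_cons.mp h2).1 a h
            exact kltB_asymm hk1 hk2
      subst hab
      have hpt := hp.cons_inv
      rw [ih t₂ hpt (List.pairwise_cons.mp h1).2 (List.pairwise_cons.mp h2).2]

-- ---- phase 1 of trim is the identity on duplicate-free clauses ----
theorem trimInner_eq_of_nodup (fuel : Nat) (c : List String) (i j : Int) (hc : c.Nodup)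
    (hi : 0 ≤ i) (hij : i < j) : trimInner fuel c i j = (c, i) := by
  induction fuel generalizing j with
  | zero => rfl
  | succ f ih =>
    rw [trimInner]
    split
    · rename_i hlt
      have hjlt : j.toNat < c.length := by omega
      have hilt : i.toNat < c.length := by omega
      have hiv : PySem.List.pyGet? c i = some (getElem c i.toNat hilt) := by
        conv_lhs => rw [← Int.toNat_of_nonneg hi]
        rw [PySem.List.pyGet?_natCast, List.getElem?_eq_getElem hilt]
      have hjv : PySem.List.pyGet? c j = some (getElem c j.toNat hjlt) := by
        conv_lhs => rw [← Int.toNat_of_nonneg (by omega : (0:Int) ≤ j)]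
        rw [PySem.List.pyGet?_natCast, List.getElem?_eq_getElem hjlt]
      rw [hiv, hjv]
      show (if getElem c i.toNat hilt = getElem c j.toNat hjlt
        then trimInner f (c.eraseIdx j.toNat) (i - 1) j else trimInner f c i (j + 1)) = (c, i)
      have hne : getElem c i.toNat hilt ≠ getElem c j.toNat hjlt := by
        intro heq
        have := (List.nodup_iff_getElem?_ne_getElem?.mp hc) i.toNat j.toNat (by omega) hjlt
        rw [List.getElem?_eq_getElem hilt, List.getElem?_eq_getElem hjlt, heq] at this
        exact this rfl
      rw [if_neg hne]
      exact ih (j + 1) (by omega)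
    · rfl

theorem trimOuter_eq_of_nodup (fuel : Nat) (c : List String) (i : Int) (hc : c.Nodup)
    (hi : 0 ≤ i) : trimOuter fuel c i = c := by
  induction fuel generalizing i with
  | zero => rfl
  | succ f ih =>
    rw [trimOuter]
    split
    · rw [trimInner_eq_of_nodup (2 * c.length + 2) c i (i + 1) hc hi (by omega)]
      exact ih (i + 1) (by omega)
    · rfl

-- ---- Source B's key lambda computes comparator_form ----
theorem key1_eq (x : String) : key1 x = comparator_form x := by
  unfold key1
  have htake : (PySem.Str.slice x none (some 1)).toList = x.toList.take 1 := by
    simp [PySem.Str.toList_slice]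
    rw [PySem.List.slice_to x.toList (by norm_num : (0:Int) ≤ 1)]
    simp
  have hdrop : (PySem.Str.slice x (some 1) none).toList = x.toList.drop 1 := by
    simp [PySem.Str.toList_slice]
    rw [PySem.List.slice_from x.toList (by norm_num : (0:Int) ≤ 1)]
    simp
  rcases hx : x.toList with _ | ⟨c, r⟩
  · rw [if_neg, cf_nil x hx]
    intro hcon
    have := congrArg String.toList hcon
    rw [htake, hx] at this
    simp at this
  · by_cases hc : c = '-'
    · subst hc
      rw [if_pos, cf_dash r x hx]
      · apply str_eq_iff _ _ |>.mpr
        rw [hdrop, hx]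
        simp
      · apply str_eq_iff _ _ |>.mpr
        rw [htake, hx]
        rfl
    · rw [if_neg, cf_cons c r x hx hc]
      intro hcon
      have := congrArg String.toList hcon
      rw [htake, hx] at this
      simp at this
      exact hc this

-- ---- sorted2 with Source B's key is insertion by kltB ----
theorem sorted2_eq_foldl (xs : List String) :
    PySem.List.sorted2 xs key1 (fun x => x) false
      = xs.foldl (fun acc x => PySem.List.insertBy (fun a b => kltB a b) x acc) [] := by
  show xs.foldl (fun acc x => PySem.List.insertBy
      (fun a b => decide (key1 a < key1 b) || (!decide (key1 b < key1 a) && decide (a < b)))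
      x acc) [] = _
  have hb : (fun a b : String =>
      decide (key1 a < key1 b) || (!decide (key1 b < key1 a) && decide (a < b)))
      = fun a b => kltB a b := by
    funext a b
    rw [key1_eq, key1_eq]
    rcases lt_trichotomy (comparator_form a) (comparator_form b) with h | h | h
    · simp [kltB, h, asymm h]
    · simp [kltB, h]
    · simp [kltB, h, asymm h, ne_of_gt h]
  rw [hb]

def KleP (a b : String) : Prop := kltB a b = true ∨ a = b

theorem insertBy_pairwise (x : String) (l : List String) (h : l.Pairwise KleP) :
    (PySem.List.insertBy (fun a b => kltB a b) x l).Pairwise KleP := by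
  induction l with
  | nil => simp [PySem.List.insertBy, List.pairwise_cons]
  | cons y ys ih =>
    simp only [PySem.List.insertBy]
    split
    · rename_i hxy
      refine List.pairwise_cons.mpr ⟨?_, h⟩
      intro b hb
      rcases List.mem_cons.mp hb with rfl | hb'
      · exact Or.inl hxy
      · rcases (List.pairwise_cons.mp h).1 b hb' with hk | hk
        · exact Or.inl (kltB_trans hxy hk)
        · exact Or.inl (hk ▸ hxy)
    · rename_i hxy
      refine List.pairwise_cons.mpr ⟨?_, ih (List.pairwise_cons.mp h).2⟩
      intro b hb
      rcases (PySem.List.mem_insertBy _ x b ys).mp hb with rfl | hb'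
      · by_cases hbe : y = b
        · exact Or.inr hbe
        · rcases kltB_total hbe with hk | hk
          · exact Or.inl hk
          · exact absurd hk (by simpa using hxy)
      · exact (List.pairwise_cons.mp h).1 b hb'

theorem foldl_insertBy_pairwise (xs : List String) :
    (xs.foldl (fun acc x => PySem.List.insertBy (fun a b => kltB a b) x acc) []).Pairwise KleP
      := by
  -- generalized form
  suffices hgen : ∀ (xs acc : List String), acc.Pairwise KleP →
      (xs.foldl (fun acc x => PySem.List.insertBy (fun a b => kltB a b) x acc) acc).Pairwise KleP by
    exact hgen xs [] (by simp)
  intro xs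
  induction xs with
  | nil => intro acc h2; exact h2
  | cons x t ih =>
    intro acc h2
    exact ih _ (insertBy_pairwise x acc h2)

theorem pairwise_klt_of_kle_nodup {l : List String} (h1 : l.Pairwise KleP) (h2 : l.Nodup) :
    l.Pairwise (fun a b => kltB a b = true) := by
  refine (h1.and h2).imp ?_
  rintro a b ⟨hk, hne⟩
  exact hk.resolve_right (fun he => hne he)

-- ---- the two normalizations agree ----
def nrm (c : List String) : List String :=
  trim (PySem.List.sorted (PySem.Set.ofList c) (fun x => x) false)

theorem nrm_eq_selSort (c : List String) :
    nrm c = selSort (PySem.List.sorted (PySem.Set.ofList c) (fun x => x) false) := by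
  unfold nrm trim
  rw [trimOuter_eq_of_nodup _ _ _
    ((PySem.List.sorted_perm _ _ _).nodup_iff.mpr (PySem.Set.nodup_ofList c)) le_rfl]

theorem nrm_perm_pairwise (c : List String) :
    (nrm c).Perm (PySem.Set.ofList c) ∧ (nrm c).Pairwise (fun a b => kltB a b = true) := by
  rw [nrm_eq_selSort]
  have hz : (PySem.List.sorted (PySem.Set.ofList c) (fun x => x) false).Perm (PySem.Set.ofList c) :=
    PySem.List.sorted_perm _ _ _
  have hpw : (PySem.List.sorted (PySem.Set.ofList c) (fun x => x) false).Pairwise (· < ·) :=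
    PySem.List.sorted_ofList_pairwise_lt c
  have hnd : (PySem.List.sorted (PySem.Set.ofList c) (fun x => x) false).Nodup :=
    hz.nodup_iff.mpr (PySem.Set.nodup_ofList c)
  obtain ⟨h1, h2⟩ := selSort_spec _ _ le_rfl hnd (INV2_of_pairwise hpw)
  exact ⟨h1.trans hz, h2⟩

theorem nrm_perm (c : List String) : (nrm c).Perm (PySem.Set.ofList c) := (nrm_perm_pairwise c).1

theorem nrm_nodup (c : List String) : (nrm c).Nodup :=
  (nrm_perm c).nodup_iff.mpr (PySem.Set.nodup_ofList c)

theorem nrm_mem (c : List String) (a : String) : a ∈ nrm c ↔ a ∈ c :=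
  ((nrm_perm c).mem_iff).trans (PySem.Set.mem_ofList c a)

theorem nrm_length (c : List String) : (nrm c).length = (PySem.Set.ofList c).length :=
  (nrm_perm c).length_eq

theorem nrm_canon (x y : List String) (h : ∀ a, a ∈ x ↔ a ∈ y) : nrm x = nrm y := by
  unfold nrm
  rw [PySem.List.sorted_eq_sorted_of_perm (PySem.Set.ofList x) (PySem.Set.ofList y) (fun x => x)
    Function.injective_id
    ((List.perm_ext_iff_of_nodup (PySem.Set.nodup_ofList x) (PySem.Set.nodup_ofList y)).mpr
      (by intro a; rw [PySem.Set.mem_ofList, PySem.Set.mem_ofList]; exact h a))]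

theorem nrm2_eq_nrm (c : List String) :
    PySem.List.sorted2 (PySem.Set.ofList c) key1 (fun x => x) false = nrm c := by
  have hperm2 : (PySem.List.sorted2 (PySem.Set.ofList c) key1 (fun x => x) false).Perm
      (PySem.Set.ofList c) := PySem.List.sorted2_perm _ _ _ _
  have hnd2 : (PySem.List.sorted2 (PySem.Set.ofList c) key1 (fun x => x) false).Nodup :=
    hperm2.nodup_iff.mpr (PySem.Set.nodup_ofList c)
  have hpw2 : (PySem.List.sorted2 (PySem.Set.ofList c) key1 (fun x => x) false).Pairwise
      (fun a b => kltB a b = true) := by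
    rw [sorted2_eq_foldl]
    refine pairwise_klt_of_kle_nodup (foldl_insertBy_pairwise _) ?_
    rw [← sorted2_eq_foldl]
    exact hnd2
  obtain ⟨h1, h2⟩ := nrm_perm_pairwise c
  exact klt_sorted_unique _ _ (hperm2.trans h1.symm) hpw2 h2

-- ---- A's loop as a greedy scan, B's two phases as dedup + minimal filter ----
def gstep (acc : List (List String)) (x : List String) : List (List String) :=
  if ∀ e ∈ acc, ¬ e ⊆ x then acc ++ [x] else acc

def greedy (L : List (List String)) : List (List String) := L.foldl gstep []

abbrev psub (d c : List String) : Prop := d ⊆ c ∧ ¬ c ⊆ d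

def minf (M : List (List String)) : List (List String) :=
  M.filter (fun c => decide (∀ d ∈ M, ¬ psub d c))

theorem issub_ofList_iff (d c : List String) :
    PySem.Set.issubset (PySem.Set.ofList d) (PySem.Set.ofList c) = true ↔ d ⊆ c := by
  rw [PySem.Set.issubset_iff]
  constructor
  · intro h a ha
    exact (PySem.Set.mem_ofList c a).mp (h a ((PySem.Set.mem_ofList d a).mpr ha))
  · intro h a ha
    exact (PySem.Set.mem_ofList c a).mpr (h ((PySem.Set.mem_ofList d a).mp ha))

theorem is_eval_iff (clause : List String) (exist : List (List String)) :
    is_eval_cnf_form clause exist = true ↔ ∀ e ∈ exist, ¬ e ⊆ clause := by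
  induction exist with
  | nil => simp [is_eval_cnf_form]
  | cons c rest ih =>
    by_cases hcs : PySem.Set.issubset (PySem.Set.ofList c) (PySem.Set.ofList clause) = true
    · simp only [is_eval_cnf_form, if_pos hcs, List.forall_mem_cons]
      have := (issub_ofList_iff c clause).mp hcs
      simp [this]
    · simp only [is_eval_cnf_form, if_neg hcs, ih, List.forall_mem_cons]
      have : ¬ c ⊆ clause := fun h => hcs ((issub_ofList_iff c clause).mpr h)
      simp [this]

theorem stepA_eq (acc : List (List String)) (x : List String) :
    (if x ∉ acc ∧ is_eval_cnf_form x acc then acc ++ [x] else acc) = gstep acc x := by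
  unfold gstep
  by_cases hmem : x ∈ acc
  · rw [if_neg (by simp [hmem]), if_neg]
    intro hall
    exact hall x hmem (List.Subset.refl x)
  · by_cases hev : ∀ e ∈ acc, ¬ e ⊆ x
    · rw [if_pos ⟨hmem, (is_eval_iff x acc).mpr hev⟩, if_pos hev]
    · rw [if_neg, if_neg hev]
      rintro ⟨-, h2⟩
      exact hev ((is_eval_iff x acc).mp h2)

theorem foldl_fun_congr {α β : Type} {f g : α → β → α} (h : ∀ acc x, f acc x = g acc x)
    (l : List β) (init : α) : List.foldl f init l = List.foldl g init l := by
  induction l generalizing init with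
  | nil => rfl
  | cons b t ih => simp only [List.foldl_cons, h, ih]

theorem dnf_to_cnf_eq_greedy (alpha_list : List (List String)) :
    dnf_to_cnf alpha_list =
      greedy ((PySem.List.sorted alpha_list (fun x => PySem.Set.len (PySem.Set.ofList x)) false).map nrm) := by
  unfold dnf_to_cnf greedy
  rw [List.foldl_map]
  exact foldl_fun_congr (fun acc i => stepA_eq acc (nrm i)) _ _

theorem filterB_eq_minf (norm : List (List String)) :
    norm.filter (fun c => ! norm.any (fun d =>
      PySem.Set.issubset (PySem.Set.ofList d) (PySem.Set.ofList c)
        && ! PySem.Set.issubset (PySem.Set.ofList c) (PySem.Set.ofList d))) = minf norm := by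
  unfold minf
  apply List.filter_congr
  intro c _
  have hany : (norm.any (fun d =>
      PySem.Set.issubset (PySem.Set.ofList d) (PySem.Set.ofList c)
        && ! PySem.Set.issubset (PySem.Set.ofList c) (PySem.Set.ofList d)) = true)
      ↔ ∃ d ∈ norm, psub d c := by
    rw [List.any_eq_true]
    constructor
    · rintro ⟨d, hd, hb⟩
      rw [Bool.and_eq_true, Bool.not_eq_true'] at hb
      refine ⟨d, hd, (issub_ofList_iff d c).mp hb.1, fun hcd => ?_⟩
      rw [(issub_ofList_iff c d).mpr hcd] at hb
      exact absurd hb.2 (by simp)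
    · rintro ⟨d, hd, h1, h2⟩
      refine ⟨d, hd, ?_⟩
      rw [Bool.and_eq_true, Bool.not_eq_true']
      refine ⟨(issub_ofList_iff d c).mpr h1, ?_⟩
      rw [Bool.eq_false_iff]
      intro hh
      exact h2 ((issub_ofList_iff c d).mp hh)
  rw [Bool.eq_iff_iff, decide_eq_true_iff]
  constructor
  · intro hb d hd hp
    rw [Bool.not_eq_true'] at hb
    have := hany.mpr ⟨d, hd, hp⟩
    rw [hb] at this
    exact Bool.false_ne_true this
  · intro hall
    rw [Bool.not_eq_true']
    by_contra hne
    have hT : norm.any (fun d =>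
        PySem.Set.issubset (PySem.Set.ofList d) (PySem.Set.ofList c)
          && ! PySem.Set.issubset (PySem.Set.ofList c) (PySem.Set.ofList d)) = true := by
      revert hne
      cases norm.any (fun d =>
        PySem.Set.issubset (PySem.Set.ofList d) (PySem.Set.ofList c)
          && ! PySem.Set.issubset (PySem.Set.ofList c) (PySem.Set.ofList d)) <;> simp
    obtain ⟨d, hd, hp⟩ := hany.mp hT
    exact hall d hd hp

theorem norm_fold_eq (alpha_list : List (List String)) :
    List.foldl
      (fun (norm : List (List String)) c =>
        if PySem.List.sorted2 (PySem.Set.ofList c) key1 (fun x => x) false ∈ norm then norm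
        else norm ++ [PySem.List.sorted2 (PySem.Set.ofList c) key1 (fun x => x) false])
      [] (PySem.List.sorted alpha_list (fun x => PySem.Set.len (PySem.Set.ofList x)) false)
      = PySem.Set.ofList ((PySem.List.sorted alpha_list (fun x => PySem.Set.len (PySem.Set.ofList x)) false).map nrm) := by
  rw [PySem.Set.ofList_eq_foldl, List.foldl_map]
  refine foldl_fun_congr (fun s c => ?_) _ _
  rw [nrm2_eq_nrm]
  exact (PySem.Set.add_eq_ite s (nrm c)).symm

theorem dnf_to_cnf_alt_eq_minf (alpha_list : List (List String)) :
    dnf_to_cnf_alt alpha_list =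
      minf (PySem.Set.ofList ((PySem.List.sorted alpha_list (fun x => PySem.Set.len (PySem.Set.ofList x)) false).map nrm)) := by
  unfold dnf_to_cnf_alt
  exact (filterB_eq_minf _).trans (congrArg minf (norm_fold_eq alpha_list))

-- ---- the combinatorial core: the greedy scan keeps exactly the minimal clauses ----
theorem psub_length_lt (d x : List String) (hd : d.Nodup) (h : psub d x) : d.length < x.length := by
  have hsp := hd.subperm h.1
  have hle := hsp.length_le
  rcases Nat.lt_or_ge d.length x.length with h' | h'
  · exact h'
  · exact absurd ((hsp.perm_of_length_le (by omega)).symm.subset) (fun hh => h.2 hh)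

theorem subsumed (M : List (List String)) (HN : ∀ x ∈ M, x.Nodup) :
    ∀ (n : Nat) (x : List String), x.length ≤ n → (∃ d ∈ M, psub d x) → ∃ e ∈ minf M, e ⊆ x := by
  intro n
  induction n with
  | zero =>
    rintro x hx ⟨d, hdM, hdx⟩
    exfalso
    have := psub_length_lt d x (HN d hdM) hdx
    omega
  | succ n ih =>
    rintro x hx ⟨d, hdM, hdx⟩
    by_cases hmin : ∀ d' ∈ M, ¬ psub d' d
    · exact ⟨d, List.mem_filter.mpr ⟨hdM, by simpa using hmin⟩, hdx.1⟩
    · push Not at hmin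
      obtain ⟨d', hd'M, hpd⟩ := hmin
      have hlen : d.length ≤ n := by
        have := psub_length_lt d x (HN d hdM) hdx
        omega
      obtain ⟨e, he, hed⟩ := ih d hlen ⟨d', hd'M, hpd⟩
      exact ⟨e, he, hed.trans hdx.1⟩

theorem greedy_eq_minf (L : List (List String))
    (HN : ∀ x ∈ L, x.Nodup)
    (HC : ∀ x ∈ L, ∀ y ∈ L, (∀ a, a ∈ x ↔ a ∈ y) → x = y)
    (HM : L.Pairwise (fun x y => x.length ≤ y.length)) :
    greedy L = minf (PySem.Set.ofList L) := by
  induction L using List.reverseRecOn with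
  | nil => rfl
  | append_singleton P x ih =>
    have HNP : ∀ y ∈ P, y.Nodup := fun y hy => HN y (List.mem_append_left _ hy)
    have HCP : ∀ y ∈ P, ∀ z ∈ P, (∀ a, a ∈ y ↔ a ∈ z) → y = z :=
      fun y hy z hz => HC y (List.mem_append_left _ hy) z (List.mem_append_left _ hz)
    obtain ⟨HMP, -, Hcross⟩ := List.pairwise_append.mp HM
    have hxL : x ∈ P ++ [x] := List.mem_append_right _ (List.mem_singleton_self x)
    have hxn : x.Nodup := HN x hxL
    have hacc := ih HNP HCP HMP
    have hgre : greedy (P ++ [x]) = gstep (greedy P) x := by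
      simp [greedy, List.foldl_append]
    rw [hgre, hacc, PySem.Set.ofList_append_singleton]
    set M := PySem.Set.ofList P with hM
    have HNM : ∀ y ∈ M, y.Nodup := fun y hy => HNP y ((PySem.Set.mem_ofList P y).mp hy)
    by_cases hx : x ∈ P
    · rw [PySem.Set.add_of_mem ((PySem.Set.mem_ofList P x).mpr hx)]
      unfold gstep
      rw [if_neg]
      intro hall
      have hxM : x ∈ M := (PySem.Set.mem_ofList P x).mpr hx
      by_cases hxmin : x ∈ minf M
      · exact hall x hxmin (List.Subset.refl x)
      · have hne : ¬ (∀ d ∈ M, ¬ psub d x) := by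
          intro hmin
          exact hxmin (List.mem_filter.mpr ⟨hxM, by simpa using hmin⟩)
        push Not at hne
        obtain ⟨d, hdM, hpd⟩ := hne
        obtain ⟨e, he, hex⟩ := subsumed M HNM x.length x le_rfl ⟨d, hdM, hpd⟩
        exact hall e he hex
    · have hxM : x ∉ M := fun h => hx ((PySem.Set.mem_ofList P x).mp h)
      rw [PySem.Set.add_of_not_mem hxM]
      have K1 : ∀ c ∈ M, ¬ psub x c := by
        rintro c hc ⟨hsub, hnsub⟩
        have hcx : c.length ≤ x.length :=
          Hcross c ((PySem.Set.mem_ofList P c).mp hc) x (List.mem_singleton_self x)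
        have hsp := hxn.subperm hsub
        have := hsp.length_le
        exact hnsub ((hsp.perm_of_length_le (by omega)).symm.subset)
      have hcondiff : (∀ e ∈ minf M, ¬ e ⊆ x) ↔ (∀ d ∈ M, ¬ psub d x) := by
        constructor
        · intro h d hdM hpd
          obtain ⟨e, he, hex⟩ := subsumed M HNM x.length x le_rfl ⟨d, hdM, hpd⟩
          exact h e he hex
        · intro h e he hex
          have heM : e ∈ M := (List.mem_filter.mp he).1
          by_cases hxe : x ⊆ e
          · have hmem : ∀ a, a ∈ e ↔ a ∈ x := fun a => ⟨fun ha => hex ha, fun ha => hxe ha⟩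
            have hex2 : e = x :=
              HC e (List.mem_append_left _ ((PySem.Set.mem_ofList P e).mp heM)) x hxL hmem
            rw [hex2] at heM
            exact hxM heM
          · exact h e heM ⟨hex, hxe⟩
      have hminf : minf (M ++ [x]) = minf M ++ (if ∀ d ∈ M, ¬ psub d x then [x] else []) := by
        unfold minf
        rw [List.filter_append]
        congr 1
        · apply List.filter_congr
          intro c hc
          rw [Bool.eq_iff_iff, decide_eq_true_iff, decide_eq_true_iff]
          constructor
          · intro h d hd
            exact h d (List.mem_append_left _ hd)
          · intro h d hd
            rcases List.mem_append.mp hd with h1 | h1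
            · exact h d h1
            · rw [List.mem_singleton.mp h1]
              exact K1 c hc
        · simp only [List.filter_cons, List.filter_nil]
          have hpx : (decide (∀ d ∈ M ++ [x], ¬ psub d x) = true) ↔ (∀ d ∈ M, ¬ psub d x) := by
            rw [decide_eq_true_iff]
            constructor
            · intro h d hd
              exact h d (List.mem_append_left _ hd)
            · intro h d hd
              rcases List.mem_append.mp hd with h1 | h1
              · exact h d h1
              · rw [List.mem_singleton.mp h1]
                rintro ⟨hs, hn⟩
                exact hn hs
          by_cases hcond : ∀ d ∈ M, ¬ psub d x
          · rw [if_pos (hpx.mpr hcond), if_pos hcond]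
          · rw [if_neg (fun hh => hcond (hpx.mp hh)), if_neg hcond]
      rw [hminf]
      unfold gstep
      by_cases hcond : ∀ d ∈ M, ¬ psub d x
      · rw [if_pos (hcondiff.mpr hcond), if_pos hcond]
      · rw [if_neg (fun hh => hcond (hcondiff.mp hh)), if_neg hcond, List.append_nil]


-- ===== VERDICT (by name: the statement is the Claim_ definition above) =====
theorem dnf_to_cnf_spec : Claim_equal_dnf_to_cnf := by
  intro alpha_list _ _
  unfold Spec_dnf_to_cnf
  rw [dnf_to_cnf_eq_greedy, dnf_to_cnf_alt_eq_minf]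
  set S := PySem.List.sorted alpha_list (fun x => PySem.Set.len (PySem.Set.ofList x)) false with hS
  apply greedy_eq_minf
  · intro x hx
    obtain ⟨c, _, rfl⟩ := List.mem_map.mp hx
    exact nrm_nodup c
  · intro x hx y hy hmem
    obtain ⟨c, _, rfl⟩ := List.mem_map.mp hx
    obtain ⟨c', _, rfl⟩ := List.mem_map.mp hy
    exact nrm_canon c c' (by intro a; rw [← nrm_mem c a, ← nrm_mem c' a]; exact hmem a)
  · rw [List.pairwise_map]
    have hp := PySem.List.sorted_pairwise alpha_list (fun x => PySem.Set.len (PySem.Set.ofList x))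
    rw [← hS] at hp
    refine hp.imp ?_
    intro a b hab
    rw [nrm_length, nrm_length]
    simp only [PySem.Set.len] at hab
    omega
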